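-- pv_equiv track=rewrite | github.com/thebyrdman-git/taminator | taminator/src/taminator/tools/t3_manager.py | get_blog_categories
-- ===== SOURCE A (Python) =====
-- from typing import List, Dict, Optional
--
-- def get_blog_categories(blogs: List[Dict]) -> List[str]:
--     """
--     Extract unique categories/topics from blog titles.
--
--     Args:
--         blogs: List of blog dictionaries
--
--     Returns:
--         List of unique categories
--     """
--     categories = set()
--
--     # Common Red Hat product keywords
--     keywords = [
--         'RHEL', 'OpenShift', 'Ansible', 'Satellite', 'OpenStack',
--         'Storage', 'Virtualization', 'Container', 'Security',
--         'Performance', 'Networking', 'Cloud'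
--     ]
--
--     for blog in blogs:
--         title = blog.get('title', '')
--         for keyword in keywords:
--             if keyword.lower() in title.lower():
--                 categories.add(keyword)
--
--     return sorted(list(categories))
-- ===== SOURCE B (Python) =====
-- from typing import List, Dict
--
--
-- def get_blog_categories(blogs: List[Dict]) -> List[str]:
--     """Extract unique categories/topics from blog titles (aggregate-haystack pass)."""
--     keywords = [
--         'RHEL', 'OpenShift', 'Ansible', 'Satellite', 'OpenStack',
--         'Storage', 'Virtualization', 'Container', 'Security',
--         'Performance', 'Networking', 'Cloud'
--     ]
--     # One combined lowercase haystack; keywords contain no spaces, so a match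
--     # in the haystack is exactly a match in some individual title.
--     haystack = ' '.join(blog.get('title', '').lower() for blog in blogs)
--     return sorted(k for k in keywords if k.lower() in haystack)
-- ===== Notes on version B (the rewrite author's own statement) =====
-- stated objective: alternative
-- what changed: B replaces A's blog-outer/keyword-inner nested scan building a set with an aggregate pass: it concatenates all lowercased titles into one space-joined haystack string and then makes a single filter pass over the fixed keyword list, removing the set entirely.
import Mathlib
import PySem

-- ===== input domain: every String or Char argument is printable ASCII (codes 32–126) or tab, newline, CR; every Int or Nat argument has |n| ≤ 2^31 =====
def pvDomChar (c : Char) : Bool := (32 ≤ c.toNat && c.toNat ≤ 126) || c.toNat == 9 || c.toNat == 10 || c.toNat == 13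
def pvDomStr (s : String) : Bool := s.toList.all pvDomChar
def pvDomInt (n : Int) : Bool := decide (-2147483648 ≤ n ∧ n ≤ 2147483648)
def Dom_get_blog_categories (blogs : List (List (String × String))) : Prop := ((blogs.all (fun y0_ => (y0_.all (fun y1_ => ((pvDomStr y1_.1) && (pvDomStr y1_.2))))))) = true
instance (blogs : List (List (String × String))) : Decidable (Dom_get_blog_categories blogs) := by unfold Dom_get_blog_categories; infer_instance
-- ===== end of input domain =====

-- B replaces the blog-outer/keyword-inner nested scan with a set by one aggregate
-- space-joined lowercase haystack and a single filter pass over the keyword list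
-- (objective: alternative decomposition, same exact result).

-- the fixed keyword literal both Pythons contain
def pvKeywords : List String :=
  ["RHEL", "OpenShift", "Ansible", "Satellite", "OpenStack",
   "Storage", "Virtualization", "Container", "Security",
   "Performance", "Networking", "Cloud"]

-- ===== PORT A =====
def get_blog_categories (blogs : List (List (String × String))) : List String :=
  let categories : PySem.Set String := PySem.Set.empty
  let categories := blogs.foldl (fun categories blog =>
    let title := (PySem.Dict.mk blog).getD "title" ""
    pvKeywords.foldl (fun categories keyword =>
      if PySem.Str.isIn (PySem.Str.lower keyword) (PySem.Str.lower title) then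
        PySem.Set.add categories keyword
      else categories) categories) categories
  PySem.List.sorted categories (fun x => x)

-- ===== PORT B =====
def get_blog_categories_alt (blogs : List (List (String × String))) : List String :=
  let haystack := PySem.Str.join " "
    (blogs.map (fun blog => PySem.Str.lower ((PySem.Dict.mk blog).getD "title" "")))
  PySem.List.sorted
    (pvKeywords.filter (fun k => PySem.Str.isIn (PySem.Str.lower k) haystack))
    (fun x => x)

-- ===== PRECONDITION & SPEC =====
def Spec_get_blog_categories (blogs : List (List (String × String))) (out : List String) : Prop := out = get_blog_categories_alt blogs
instance (blogs : List (List (String × String))) (out : List String) : Decidable (Spec_get_blog_categories blogs out) := by unfold Spec_get_blog_categories; infer_instance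

-- ===== CLAIM (what is proved, stated in full; the proofs are below) =====
def Claim_equal_get_blog_categories : Prop := ∀ (blogs : List (List (String × String))), Dom_get_blog_categories blogs → Spec_get_blog_categories blogs (get_blog_categories blogs)

-- ===== LEMMAS AND PROOFS =====

-- a prefix of l₁ ++ c :: l₂ that avoids c is a prefix of l₁
theorem pvPrefixSplit {cs l₁ l₂ : List Char} {c : Char}
    (h : cs <+: l₁ ++ c :: l₂) (hc : c ∉ cs) : cs <+: l₁ := by
  induction cs generalizing l₁ with
  | nil => exact List.nil_prefix
  | cons y ys ih =>
    cases l₁ with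
    | nil =>
      rcases List.cons_prefix_cons.mp h with ⟨rfl, -⟩
      exact absurd (List.mem_cons_self) hc
    | cons z l₁' =>
      rcases List.cons_prefix_cons.mp h with ⟨rfl, h'⟩
      exact List.cons_prefix_cons.mpr ⟨rfl, ih h' (fun hm => hc (List.mem_cons_of_mem _ hm))⟩

-- an infix of l₁ ++ c :: l₂ that avoids c lies wholly in l₁ or in l₂
theorem pvInfixSplit {cs l₁ l₂ : List Char} {c : Char}
    (h : cs <:+: l₁ ++ c :: l₂) (hc : c ∉ cs) : cs <:+: l₁ ∨ cs <:+: l₂ := by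
  induction l₁ with
  | nil =>
    simp only [List.nil_append] at h
    rcases List.infix_cons_iff.mp h with hp | hi
    · cases cs with
      | nil => exact Or.inl (List.nil_infix)
      | cons y ys =>
        rcases List.cons_prefix_cons.mp hp with ⟨rfl, -⟩
        exact absurd (List.mem_cons_self) hc
    · exact Or.inr hi
  | cons x l₁' ih =>
    rcases List.infix_cons_iff.mp h with hp | hi
    · left
      cases cs with
      | nil => exact List.nil_infix
      | cons y ys =>
        rcases List.cons_prefix_cons.mp hp with ⟨rfl, h'⟩
        have : ys <+: l₁' := pvPrefixSplit h' (fun hm => hc (List.mem_cons_of_mem _ hm))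
        exact (List.cons_prefix_cons.mpr ⟨rfl, this⟩).isInfix
    · rcases ih hi with h1 | h2
      · exact Or.inl (h1.trans (List.suffix_cons x l₁').isInfix)
      · exact Or.inr h2

-- a nonempty, space-free word is an infix of the space-joined list iff it is an infix of some part
theorem pvInfixJoin {cs : List Char} (hne : cs ≠ []) (hc : ' ' ∉ cs) :
    ∀ ls : List (List Char), (cs <:+: PySem.Chars.join [' '] ls ↔ ∃ l ∈ ls, cs <:+: l) := by
  intro ls
  induction ls with
  | nil =>
    simp only [PySem.Chars.join, List.intercalate, List.intersperse, List.flatten]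
    constructor
    · intro h; exact absurd (List.eq_nil_of_infix_nil h) hne
    · rintro ⟨l, hl, -⟩; exact absurd hl (List.not_mem_nil)
  | cons x ls ih =>
    cases ls with
    | nil =>
      simp [PySem.Chars.join, List.intercalate]
    | cons y ls' =>
      have hjoin : PySem.Chars.join [' '] (x :: y :: ls') =
          x ++ ' ' :: PySem.Chars.join [' '] (y :: ls') := by
        simp [PySem.Chars.join, List.intercalate]
      rw [hjoin]
      constructor
      · intro h
        rcases pvInfixSplit h hc with h1 | h2
        · exact ⟨x, List.mem_cons_self, h1⟩
        · rcases ih.mp h2 with ⟨l, hl, hcl⟩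
          exact ⟨l, List.mem_cons_of_mem _ hl, hcl⟩
      · rintro ⟨l, hl, hcl⟩
        rcases List.mem_cons.mp hl with rfl | hl'
        · exact hcl.trans (List.prefix_append l _).isInfix
        · exact (ih.mpr ⟨l, hl', hcl⟩).trans
            ((List.suffix_cons ' ' _).trans (List.suffix_append x _)).isInfix

-- membership through A's inner keyword loop
theorem pvMemInner (t : String) (kws : List String) (s : PySem.Set String) (x : String) :
    x ∈ kws.foldl (fun categories keyword =>
        if PySem.Str.isIn (PySem.Str.lower keyword) (PySem.Str.lower t) then
          PySem.Set.add categories keyword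
        else categories) s ↔
      x ∈ s ∨ (x ∈ kws ∧ PySem.Str.isIn (PySem.Str.lower x) (PySem.Str.lower t) = true) := by
  induction kws generalizing s with
  | nil => simp
  | cons k kws ih =>
    rw [List.foldl_cons]
    by_cases hk : PySem.Str.isIn (PySem.Str.lower k) (PySem.Str.lower t) = true
    · rw [if_pos hk, ih]
      simp only [PySem.Set.mem_add, List.mem_cons]
      constructor
      · rintro (⟨hs | rfl⟩ | ⟨hm, hp⟩)
        · exact Or.inl hs
        · exact Or.inr ⟨Or.inl rfl, hk⟩
        · exact Or.inr ⟨Or.inr hm, hp⟩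
      · rintro (hs | ⟨rfl | hm, hp⟩)
        · exact Or.inl (Or.inl hs)
        · exact Or.inl (Or.inr rfl)
        · exact Or.inr ⟨hm, hp⟩
    · rw [if_neg hk, ih]
      simp only [List.mem_cons]
      constructor
      · rintro (hs | ⟨hm, hp⟩)
        · exact Or.inl hs
        · exact Or.inr ⟨Or.inr hm, hp⟩
      · rintro (hs | ⟨rfl | hm, hp⟩)
        · exact Or.inl hs
        · exact absurd hp hk
        · exact Or.inr ⟨hm, hp⟩

-- A's inner loop keeps the set duplicate-free
theorem pvNodupInner (t : String) (kws : List String) (s : PySem.Set String)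
    (hs : s.Nodup) :
    (kws.foldl (fun categories keyword =>
        if PySem.Str.isIn (PySem.Str.lower keyword) (PySem.Str.lower t) then
          PySem.Set.add categories keyword
        else categories) s).Nodup := by
  induction kws generalizing s with
  | nil => exact hs
  | cons k kws ih =>
    rw [List.foldl_cons]
    split
    · exact ih _ (PySem.Set.nodup_add s k hs)
    · exact ih _ hs

-- the per-blog match condition A tests
def pvMatch (blog : List (String × String)) (kw : String) : Bool :=
  PySem.Str.isIn (PySem.Str.lower kw) (PySem.Str.lower ((PySem.Dict.mk blog).getD "title" ""))

-- membership through A's whole nested loop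
theorem pvMemOuter (blogs : List (List (String × String))) (s : PySem.Set String) (x : String) :
    x ∈ blogs.foldl (fun categories blog =>
        pvKeywords.foldl (fun categories keyword =>
          if PySem.Str.isIn (PySem.Str.lower keyword)
              (PySem.Str.lower ((PySem.Dict.mk blog).getD "title" "")) then
            PySem.Set.add categories keyword
          else categories) categories) s ↔
      x ∈ s ∨ (x ∈ pvKeywords ∧ ∃ b ∈ blogs, pvMatch b x = true) := by
  induction blogs generalizing s with
  | nil => simp
  | cons b blogs ih =>
    rw [List.foldl_cons, ih]
    rw [pvMemInner ((PySem.Dict.mk b).getD "title" "") pvKeywords s x]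
    constructor
    · rintro ((hs | ⟨hm, hp⟩) | ⟨hm, bb, hbb, hp⟩)
      · exact Or.inl hs
      · exact Or.inr ⟨hm, b, List.mem_cons_self, hp⟩
      · exact Or.inr ⟨hm, bb, List.mem_cons_of_mem _ hbb, hp⟩
    · rintro (hs | ⟨hm, bb, hbb, hp⟩)
      · exact Or.inl (Or.inl hs)
      · rcases List.mem_cons.mp hbb with h | hbb'
        · exact Or.inl (Or.inr ⟨hm, h ▸ hp⟩)
        · exact Or.inr ⟨hm, bb, hbb', hp⟩

theorem pvNodupOuter (blogs : List (List (String × String))) (s : PySem.Set String)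
    (hs : s.Nodup) :
    (blogs.foldl (fun categories blog =>
        pvKeywords.foldl (fun categories keyword =>
          if PySem.Str.isIn (PySem.Str.lower keyword)
              (PySem.Str.lower ((PySem.Dict.mk blog).getD "title" "")) then
            PySem.Set.add categories keyword
          else categories) categories) s).Nodup := by
  induction blogs generalizing s with
  | nil => exact hs
  | cons b blogs ih =>
    exact ih _ (pvNodupInner _ pvKeywords s hs)

-- every keyword lowers to a nonempty, space-free word
theorem pvKeywordsGood :
    ∀ k ∈ pvKeywords, (PySem.Chars.lower k.toList) ≠ [] ∧ ' ' ∉ PySem.Chars.lower k.toList := by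
  decide

-- a keyword matches the aggregate lowercase haystack iff it matches some blog's title
theorem pvHaystack (blogs : List (List (String × String))) (k : String) (hk : k ∈ pvKeywords) :
    PySem.Str.isIn (PySem.Str.lower k)
      (PySem.Str.join " " (blogs.map (fun blog =>
        PySem.Str.lower ((PySem.Dict.mk blog).getD "title" "")))) = true ↔
      ∃ b ∈ blogs, pvMatch b k = true := by
  obtain ⟨hne, hsp⟩ := pvKeywordsGood k hk
  rw [PySem.Str.isIn_iff_infix, PySem.Str.toList_join, PySem.Str.toList_lower]
  have hsep : " ".toList = [' '] := rfl
  rw [hsep, List.map_map]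
  rw [pvInfixJoin hne hsp]
  constructor
  · rintro ⟨l, hl, hcl⟩
    simp only [List.mem_map, Function.comp] at hl
    rcases hl with ⟨b, hb, rfl⟩
    refine ⟨b, hb, ?_⟩
    unfold pvMatch
    rw [PySem.Str.isIn_iff_infix, PySem.Str.toList_lower]
    simpa [PySem.Str.toList_lower] using hcl
  · rintro ⟨b, hb, hm⟩
    unfold pvMatch at hm
    rw [PySem.Str.isIn_iff_infix, PySem.Str.toList_lower] at hm
    refine ⟨(PySem.Str.lower ((PySem.Dict.mk b).getD "title" "")).toList, ?_, ?_⟩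
    · simp only [List.mem_map, Function.comp]
      exact ⟨b, hb, rfl⟩
    · simpa [PySem.Str.toList_lower] using hm

-- ===== VERDICT (by name: the statement is the Claim_ definition above) =====
theorem get_blog_categories_spec : Claim_equal_get_blog_categories := by
  intro blogs _
  unfold Spec_get_blog_categories
  simp only [get_blog_categories, get_blog_categories_alt]
  apply PySem.List.sorted_eq_sorted_of_perm _ _ _ (fun a b h => h)
  rw [List.perm_ext_iff_of_nodup
      (pvNodupOuter blogs PySem.Set.empty List.nodup_nil)
      (List.Nodup.filter _ (by decide))]
  intro a
  constructor
  · intro h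
    rcases (pvMemOuter blogs PySem.Set.empty a).mp h with hs | ⟨hm, hex⟩
    · exact absurd hs (List.not_mem_nil)
    · exact List.mem_filter.mpr ⟨hm, (pvHaystack blogs a hm).mpr hex⟩
  · intro h
    obtain ⟨hm, hh⟩ := List.mem_filter.mp h
    exact (pvMemOuter blogs PySem.Set.empty a).mpr (Or.inr ⟨hm, (pvHaystack blogs a hm).mp hh⟩)
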